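-- pv_equiv track=rewrite | github.com/visiblelight/jvs | backend/app/services/tick.py | compute_points
-- ===== SOURCE A (Python) =====
-- def compute_points(points_rule: list[dict], streak: int) -> int:
--     """根据阶梯积分规则和当前连续天数计算本次得分"""
--     if not points_rule or streak <= 0:
--         return 0
--     sorted_rule = sorted(points_rule, key=lambda r: r["streak"])
--     result = sorted_rule[-1]["points"]  # 默认最高档
--     for r in sorted_rule:
--         if streak <= r["streak"]:
--             result = r["points"]
--             break
--     return result
-- ===== SOURCE B (Python) =====
-- def compute_points(points_rule: list[dict], streak: int) -> int:
--     """One linear pass, no sorting: track the lowest qualifying tier and the highest tier."""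
--     if not points_rule or streak <= 0:
--         return 0
--     best = None      # rule with smallest threshold >= streak (first occurrence wins ties)
--     fallback = None  # rule with largest threshold overall (last occurrence wins ties)
--     for r in points_rule:
--         s = r["streak"]
--         if best is None:
--             if streak <= s:
--                 best = r
--         elif streak <= s and s < best["streak"]:
--             best = r
--         if fallback is None or fallback["streak"] <= s:
--             fallback = r
--     return best["points"] if best is not None else fallback["points"]
-- ===== Notes on version B (the rewrite author's own statement) =====
-- stated objective: faster
-- what changed: Replaces the stable sort plus linear scan with a single unsorted pass keeping two running rules: the lowest qualifying tier (first occurrence wins ties, mirroring the stable sort) and the highest tier overall (last occurrence wins ties).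
-- outside the precondition, e.g. on compute_points([{'streak': 2, 'points': 7}, {'streak': 1}], 2): A returns 7, B returns 7
import Mathlib
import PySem

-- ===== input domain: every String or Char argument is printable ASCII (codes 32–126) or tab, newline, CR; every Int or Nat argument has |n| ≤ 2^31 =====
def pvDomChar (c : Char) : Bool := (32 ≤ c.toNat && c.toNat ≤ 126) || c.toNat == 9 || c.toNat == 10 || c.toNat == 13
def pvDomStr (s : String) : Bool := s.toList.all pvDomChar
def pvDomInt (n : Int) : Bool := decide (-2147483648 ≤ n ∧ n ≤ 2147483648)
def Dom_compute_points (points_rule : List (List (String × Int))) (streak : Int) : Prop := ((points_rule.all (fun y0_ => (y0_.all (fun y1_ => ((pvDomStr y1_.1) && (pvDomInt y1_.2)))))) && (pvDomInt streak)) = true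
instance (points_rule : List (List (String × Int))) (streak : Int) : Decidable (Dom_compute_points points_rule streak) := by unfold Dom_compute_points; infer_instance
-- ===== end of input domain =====

-- B replaces A's stable sort + scan by one linear pass tracking the lowest qualifying tier and the
-- highest tier (objective: faster, O(n) instead of O(n log n)).


-- ===== PORT A =====
-- r["streak"] / r["points"]: first-match association-list lookup; total form is exact under Pre_ (keys present)
def pvKey (r : List (String × Int)) : Int := PySem.Dict.getD (PySem.Dict.mk r) "streak" 0
def pvPts (r : List (String × Int)) : Int := PySem.Dict.getD (PySem.Dict.mk r) "points" 0

-- the 'for r in sorted_rule: if streak <= r["streak"]: result = ...; break' loop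
def pvLoopA (streak : Int) (rs : List (List (String × Int))) (result : Int) : Int :=
  match rs with
  | [] => result
  | r :: rest => if streak ≤ pvKey r then pvPts r else pvLoopA streak rest result

def compute_points (points_rule : List (List (String × Int))) (streak : Int) : Int :=
  if points_rule = [] ∨ streak ≤ 0 then 0
  else
    let sorted_rule := PySem.List.sorted points_rule (fun r => pvKey r) false
    let result := pvPts (PySem.List.pyGetD sorted_rule (-1) [])  -- sorted_rule[-1]["points"], in range since points_rule ≠ []
    pvLoopA streak sorted_rule result

-- ===== PORT B =====
-- one loop body of Source B: update (best, fallback)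
def pvStepB (streak : Int) (acc : Option (List (String × Int)) × Option (List (String × Int)))
    (r : List (String × Int)) : Option (List (String × Int)) × Option (List (String × Int)) :=
  let s := pvKey r
  let best :=
    match acc.1 with
    | none => if streak ≤ s then some r else none
    | some b => if streak ≤ s ∧ s < pvKey b then some r else acc.1
  let fb :=
    match acc.2 with
    | none => some r
    | some f => if pvKey f ≤ s then some r else acc.2
  (best, fb)

def compute_points_alt (points_rule : List (List (String × Int))) (streak : Int) : Int :=
  if points_rule = [] ∨ streak ≤ 0 then 0
  else
    let st := points_rule.foldl (pvStepB streak) (none, none)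
    match st.1 with
    | some b => pvPts b
    | none =>
      match st.2 with
      | some f => pvPts f
      | none => 0  -- unreachable: points_rule ≠ [] keeps fallback set

-- ===== PRECONDITION & SPEC =====
-- Unless A's guard short-circuits (empty rules or streak <= 0, where A returns 0 without any lookup), Pre_
-- requires every rule to carry both keys "streak" and "points" (well-formed tier rules): Python A raises
-- KeyError on a rule missing "streak", or missing "points" in the selected/maximal rule; Pre_ narrows slightly
-- further by also requiring "points" in rules A never selects (see claim cites).
def Pre_compute_points (points_rule : List (List (String × Int))) (streak : Int) : Prop :=
  points_rule = [] ∨ streak ≤ 0 ∨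
    ∀ r ∈ points_rule, "streak" ∈ r.map Prod.fst ∧ "points" ∈ r.map Prod.fst
instance (points_rule : List (List (String × Int))) (streak : Int) : Decidable (Pre_compute_points points_rule streak) := by unfold Pre_compute_points; infer_instance
def pvWitness_compute_points : (List (List (String × Int))) × Int := ([[("streak", 1), ("points", 10)]], 1)
def Spec_compute_points (points_rule : List (List (String × Int))) (streak : Int) (out : Int) : Prop := out = compute_points_alt points_rule streak
instance (points_rule : List (List (String × Int))) (streak : Int) (out : Int) : Decidable (Spec_compute_points points_rule streak out) := by unfold Spec_compute_points; infer_instance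

-- ===== CLAIM (what is proved, stated in full; the proofs are below) =====
def Claim_equal_compute_points : Prop := ∀ (points_rule : List (List (String × Int))) (streak : Int), Dom_compute_points points_rule streak → Pre_compute_points points_rule streak → Spec_compute_points points_rule streak (compute_points points_rule streak)

-- ===== LEMMAS AND PROOFS =====

-- A's break-loop is find? followed by the payload lookup
lemma pvLoopA_eq_find (streak : Int) (rs : List (List (String × Int))) (result : Int) :
    pvLoopA streak rs result =
      match rs.find? (fun r => decide (streak ≤ pvKey r)) with
      | some r => pvPts r
      | none => result := by
  induction rs with
  | nil => rfl
  | cons r rest ih =>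
    by_cases h : streak ≤ pvKey r <;> simp [pvLoopA, List.find?, h, ih]

lemma find?_insertBy (streak : Int) (x : List (String × Int)) (S : List (List (String × Int)))
    (hS : S.Pairwise (fun a b => pvKey a ≤ pvKey b)) :
    (PySem.List.insertBy (fun a b => decide (pvKey a < pvKey b)) x S).find?
        (fun r => decide (streak ≤ pvKey r)) =
      match S.find? (fun r => decide (streak ≤ pvKey r)) with
      | none => if streak ≤ pvKey x then some x else none
      | some b => if streak ≤ pvKey x ∧ pvKey x < pvKey b then some x else some b := by
  induction S with
  | nil =>
    by_cases hx : streak ≤ pvKey x <;> simp [PySem.List.insertBy, List.find?, hx]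
  | cons y ys ih =>
    rcases List.pairwise_cons.mp hS with ⟨hy, hys⟩
    by_cases hxy : pvKey x < pvKey y
    · -- x goes in front
      have hfront : PySem.List.insertBy (fun a b => decide (pvKey a < pvKey b)) x (y :: ys)
          = x :: y :: ys := by simp [PySem.List.insertBy, hxy]
      rw [hfront]
      have hkb : ∀ b ∈ y :: ys, pvKey x < pvKey b := by
        intro b hb
        rcases List.mem_cons.mp hb with rfl | hb'
        · exact hxy
        · exact lt_of_lt_of_le hxy (hy b hb')
      rcases hfind : (y :: ys).find? (fun r => decide (streak ≤ pvKey r)) with _ | b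
      · by_cases hx : streak ≤ pvKey x <;> simp [hfind, hx]
      · have hb := hkb b (List.mem_of_find?_eq_some hfind)
        by_cases hx : streak ≤ pvKey x <;> simp [hfind, hx, hb]
    · -- y stays in front
      have htail : PySem.List.insertBy (fun a b => decide (pvKey a < pvKey b)) x (y :: ys)
          = y :: PySem.List.insertBy (fun a b => decide (pvKey a < pvKey b)) x ys := by
        simp [PySem.List.insertBy, hxy]
      rw [htail]
      by_cases hpy : streak ≤ pvKey y
      · have hno : ¬ (streak ≤ pvKey x ∧ pvKey x < pvKey y) := by tauto
        simp [hpy, hno]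
      · simp [hpy, ih hys]

lemma getLast?_insertBy (x : List (String × Int)) (S : List (List (String × Int)))
    (hS : S.Pairwise (fun a b => pvKey a ≤ pvKey b)) :
    (PySem.List.insertBy (fun a b => decide (pvKey a < pvKey b)) x S).getLast? =
      match S.getLast? with
      | none => some x
      | some m => if pvKey m ≤ pvKey x then some x else some m := by
  induction S with
  | nil => simp [PySem.List.insertBy]
  | cons y ys ih =>
    rcases List.pairwise_cons.mp hS with ⟨hy, hys⟩
    by_cases hxy : pvKey x < pvKey y
    · have hfront : PySem.List.insertBy (fun a b => decide (pvKey a < pvKey b)) x (y :: ys)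
          = x :: y :: ys := by simp [PySem.List.insertBy, hxy]
      rw [hfront]
      rcases hlast : (y :: ys).getLast? with _ | m
      · simp at hlast
      · have hm : m ∈ y :: ys := List.mem_of_getLast? hlast
        have hym : pvKey y ≤ pvKey m := by
          rcases List.mem_cons.mp hm with rfl | hm'
          · exact le_refl _
          · exact hy m hm'
        have hnle : ¬ pvKey m ≤ pvKey x := by omega
        rw [List.getLast?_cons_cons, hlast]
        simp [hnle]
    · have htail : PySem.List.insertBy (fun a b => decide (pvKey a < pvKey b)) x (y :: ys)
          = y :: PySem.List.insertBy (fun a b => decide (pvKey a < pvKey b)) x ys := by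
        simp [PySem.List.insertBy, hxy]
      rw [htail]
      cases ys with
      | nil =>
        have hle : pvKey y ≤ pvKey x := by omega
        simp [PySem.List.insertBy, hle]
      | cons z zs =>
        rcases hcase : PySem.List.insertBy (fun a b => decide (pvKey a < pvKey b)) x (z :: zs)
            with _ | ⟨w, ws⟩
        · by_cases h : pvKey x < pvKey z <;> simp [PySem.List.insertBy, h] at hcase
        · have hih := ih hys
          rw [hcase] at hih
          rw [List.getLast?_cons_cons (a := y) (b := w), hih,
            List.getLast?_cons_cons (a := y) (b := z)]

-- main invariant: B's fold state = (first qualifying element of sorted A-order, last element of sorted A-order)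
lemma foldB_spec (streak : Int) (L : List (List (String × Int))) :
    (L.foldl (pvStepB streak) (none, none)).1
        = (PySem.List.sorted L (fun r => pvKey r) false).find? (fun r => decide (streak ≤ pvKey r))
    ∧ (L.foldl (pvStepB streak) (none, none)).2
        = (PySem.List.sorted L (fun r => pvKey r) false).getLast? := by
  induction L using List.reverseRecOn with
  | nil => simp [PySem.List.sorted]
  | append_singleton M x ih =>
    have hsorted : PySem.List.sorted (M ++ [x]) (fun r => pvKey r) false
        = PySem.List.insertBy (fun a b => decide (pvKey a < pvKey b)) x
            (PySem.List.sorted M (fun r => pvKey r) false) := by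
      rw [PySem.List.sorted_eq_foldl_insertBy, PySem.List.sorted_eq_foldl_insertBy,
        List.foldl_append]
      simp only [List.foldl_cons, List.foldl_nil]
    have hpair := PySem.List.sorted_pairwise M (fun r => pvKey r)
    rw [List.foldl_append, hsorted]
    rw [find?_insertBy streak x _ hpair, getLast?_insertBy x _ hpair]
    simp only [List.foldl_cons, List.foldl_nil]
    constructor
    · rw [pvStepB]
      simp only [← ih.1]
      rcases (M.foldl (pvStepB streak) (none, none)).1 with _ | b <;> simp
    · rw [pvStepB]
      simp only [← ih.2]
      rcases (M.foldl (pvStepB streak) (none, none)).2 with _ | f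
      · simp
      · by_cases h : pvKey f ≤ pvKey x <;> simp [h]

-- ===== VERDICT (by name: the statement is the Claim_ definition above) =====
theorem compute_points_spec : Claim_equal_compute_points := by
  intro points_rule streak _hdom _hpre
  unfold Spec_compute_points compute_points compute_points_alt
  by_cases hguard : points_rule = [] ∨ streak ≤ 0
  · simp [hguard]
  · simp only [hguard, ite_false]
    have hne : points_rule ≠ [] := fun h => hguard (Or.inl h)
    have hSne : PySem.List.sorted points_rule (fun r => pvKey r) false ≠ [] := by
      simpa [PySem.List.sorted_eq_nil_iff] using hne
    rw [pvLoopA_eq_find, PySem.List.pyGetD_neg_one _ _ hSne]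
    obtain ⟨h1, h2⟩ := foldB_spec streak points_rule
    rw [h1, h2]
    rcases hf : (PySem.List.sorted points_rule (fun r => pvKey r) false).find?
        (fun r => decide (streak ≤ pvKey r)) with _ | b
    · rw [List.getLast?_eq_some_getLast hSne]
    · rfl
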